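-- pv_equiv track=rewrite | github.com/jaceiverson/Python-Projects | maths/perfect suqares.py | fromOdds
-- ===== SOURCE A (Python) =====
-- def fromOdds(value):
--     counter=2
--     Odds=[1]
--     temp2=[1]
--     for x in range(value-1):
--         temp=Odds[x]+counter
--         Odds.append(temp)
--         temp3=sum(Odds)
--         temp2.append(temp3)
--
--     return temp2
-- ===== SOURCE B (Python) =====
-- def fromOdds(value):
--     # closed form: k-th entry is (k+1)**2; no odd-number accumulation, no re-summing
--     result = [1]
--     for k in range(1, value):
--         result.append((k + 1) ** 2)
--     return result
-- ===== Notes on version B (the rewrite author's own statement) =====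
-- stated objective: faster
-- what changed: Each entry is computed directly by the closed form (k+1)**2 instead of appending the next odd number and re-summing the whole growing Odds list on every iteration.
import Mathlib
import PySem

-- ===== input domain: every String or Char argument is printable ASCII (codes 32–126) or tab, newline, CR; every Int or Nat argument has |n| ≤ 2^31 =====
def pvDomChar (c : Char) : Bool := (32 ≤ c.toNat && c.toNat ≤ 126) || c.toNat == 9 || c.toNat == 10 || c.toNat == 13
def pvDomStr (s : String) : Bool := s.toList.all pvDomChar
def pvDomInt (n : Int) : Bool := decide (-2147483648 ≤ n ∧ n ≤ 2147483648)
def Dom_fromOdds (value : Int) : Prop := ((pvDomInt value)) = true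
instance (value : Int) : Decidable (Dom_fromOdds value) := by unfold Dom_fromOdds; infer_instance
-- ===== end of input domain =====

-- B computes each entry by the closed form (k+1)^2 instead of A's per-iteration re-summing of a growing odd-number list (O(n) vs O(n^2)).


-- ===== PORT A =====
-- loop body of A; Odds[x] ported with pyGetD (x is always in range: Odds has x+1 elements at step x)
def fromOddsStep (st : List Int × List Int) (x : Int) : List Int × List Int :=
  let temp := PySem.List.pyGetD st.1 x 0 + 2
  let odds := st.1 ++ [temp]
  let temp3 := odds.sum
  (odds, st.2 ++ [temp3])

def fromOdds (value : Int) : List Int :=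
  ((PySem.List.pyRange 0 (value - 1)).foldl fromOddsStep ([1], [1])).2

-- ===== PORT B =====
def fromOdds_alt (value : Int) : List Int :=
  (PySem.List.pyRange 1 value).foldl (fun acc k => acc ++ [(k + 1) ^ 2]) [1]

-- ===== PRECONDITION & SPEC =====
def Spec_fromOdds (value : Int) (out : List Int) : Prop := out = fromOdds_alt value
instance (value : Int) (out : List Int) : Decidable (Spec_fromOdds value out) := by unfold Spec_fromOdds; infer_instance

-- ===== CLAIM (what is proved, stated in full; the proofs are below) =====
def Claim_equal_fromOdds : Prop := ∀ (value : Int), Dom_fromOdds value → Spec_fromOdds value (fromOdds value)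

-- ===== LEMMAS AND PROOFS =====

-- sum of the first m odd numbers is m^2
lemma sum_odds (m : Nat) : ((List.range m).map (fun i : Nat => 2 * (i : Int) + 1)).sum = (m : Int) ^ 2 := by
  induction m with
  | zero => simp
  | succ n ih =>
    rw [List.range_succ, List.map_append, List.sum_append, ih]
    push_cast
    simp
    ring

-- invariant of A's loop: after n iterations Odds is the first n+1 odds and temp2 the first n+1 squares
lemma loopA (n : Nat) :
    ((List.range n).map (fun k : Nat => (k : Int))).foldl fromOddsStep ([1], [1])
    = ((List.range (n + 1)).map (fun i : Nat => 2 * (i : Int) + 1),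
       (List.range (n + 1)).map (fun i : Nat => ((i : Int) + 1) ^ 2)) := by
  induction n with
  | zero => simp
  | succ n ih =>
    rw [List.range_succ, List.map_append, List.foldl_append, ih]
    simp only [List.map_cons, List.map_nil, List.foldl_cons, List.foldl_nil, fromOddsStep]
    rw [PySem.List.pyGetD_natCast, PySem.List.getD_map_range _ _ _ _ (by omega)]
    have hOdds : (List.range (n + 1)).map (fun i : Nat => 2 * (i : Int) + 1) ++ [2 * (n : Int) + 1 + 2]
        = (List.range (n + 1 + 1)).map (fun i : Nat => 2 * (i : Int) + 1) := by
      rw [List.range_succ (n := n + 1), List.map_append]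
      simp
      ring
    rw [hOdds, sum_odds]
    simp only [Prod.mk.injEq, true_and]
    rw [List.range_succ (n := n + 1), List.map_append]
    simp

-- B's fold over pyRange 1 value as a map
lemma rangeB (n : Nat) :
    PySem.List.pyRange 1 (1 + (n : Int)) = (List.range n).map (fun i : Nat => 1 + (i : Int)) := by
  induction n with
  | zero => simp [PySem.List.pyRange_one_eq_nil]
  | succ n ih =>
    have : (1 : Int) + ((n : Int) + 1) = (1 + (n : Int)) + 1 := by ring
    rw [show ((n + 1 : Nat) : Int) = (n : Int) + 1 by push_cast; ring, this,
        PySem.List.pyRange_one_succ_right (by omega), ih, List.range_succ, List.map_append]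
    simp

-- ===== VERDICT (by name: the statement is the Claim_ definition above) =====
theorem fromOdds_spec : Claim_equal_fromOdds := by
  intro value _
  unfold Spec_fromOdds fromOdds fromOdds_alt
  by_cases h : value ≤ 1
  · rw [PySem.List.pyRange_one_eq_nil (by omega), PySem.List.pyRange_one_eq_nil (by omega)]
    simp
  · have hn : value = 1 + (((value - 1).toNat : Nat) : Int) := by omega
    set n := (value - 1).toNat with hdef
    rw [show value - 1 = ((n : Nat) : Int) by omega, PySem.List.pyRange_zero_natCast, loopA,
        hn, rangeB, PySem.List.foldl_append_singleton_eq_map,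
        List.range_succ_eq_map, List.map_cons, List.map_map]
    simp only [List.singleton_append, List.map_map]
    simp only [List.map_cons, List.map_map]
    refine List.cons_eq_cons.mpr ⟨by norm_num, List.map_congr_left fun i hi => by
      simp only [Function.comp_apply, Nat.succ_eq_add_one]; push_cast; ring⟩
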